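-- pv_equiv track=rewrite | github.com/Philosoft/leetcode-practice-python | 1770__maximum_score_from_performing_multiplication_operations.py | maximumScoreBottomUp
-- ===== SOURCE A (Python) =====
-- from typing import List, Dict, Tuple
--
-- def maximumScoreBottomUp(nums: List[int], multipliers: List[int]) -> int:
--     dp = []  # first index -> multi pointer, second index -> left
--     for m in range(len(multipliers) + 1):
--         dp.append([0] * (len(nums) + 1))
--
--     for m in range(len(multipliers) - 1, -1, -1):
--         multi = multipliers[m]
--         for left in range(m, -1, -1):
--             right = len(nums) - 1 - (m - left)
--
--             option1 = multi * nums[left]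
--             option2 = multi * nums[right]
--
--             dp[m][left] = max(
--                 option1 + dp[m + 1][left + 1],
--                 option2 + dp[m + 1][left]
--             )
--
--     return dp[0][0]
-- ===== SOURCE B (Python) =====
-- from typing import List
--
--
-- def maximumScoreBottomUp(nums: List[int], multipliers: List[int]) -> int:
--     # Top-down memoized recursion over (op, left) instead of a 2-D bottom-up table.
--     memo = {}
--
--     def f(op, left):
--         if op == len(multipliers):
--             return 0
--         key = (op, left)
--         if key in memo:
--             return memo[key]
--         multi = multipliers[op]
--         right = len(nums) - 1 - (op - left)
--         best = max(multi * nums[left] + f(op + 1, left + 1),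
--                    multi * nums[right] + f(op + 1, left))
--         memo[key] = best
--         return best
--
--     return f(0, 0)
-- ===== Notes on version B (the rewrite author's own statement) =====
-- stated objective: alternative
-- what changed: Replaced the explicit (k+1)x(n+1) bottom-up DP table filled by nested index loops with a top-down recursion f(op,left) memoized in a dict, returning f(0,0).
import Mathlib
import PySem

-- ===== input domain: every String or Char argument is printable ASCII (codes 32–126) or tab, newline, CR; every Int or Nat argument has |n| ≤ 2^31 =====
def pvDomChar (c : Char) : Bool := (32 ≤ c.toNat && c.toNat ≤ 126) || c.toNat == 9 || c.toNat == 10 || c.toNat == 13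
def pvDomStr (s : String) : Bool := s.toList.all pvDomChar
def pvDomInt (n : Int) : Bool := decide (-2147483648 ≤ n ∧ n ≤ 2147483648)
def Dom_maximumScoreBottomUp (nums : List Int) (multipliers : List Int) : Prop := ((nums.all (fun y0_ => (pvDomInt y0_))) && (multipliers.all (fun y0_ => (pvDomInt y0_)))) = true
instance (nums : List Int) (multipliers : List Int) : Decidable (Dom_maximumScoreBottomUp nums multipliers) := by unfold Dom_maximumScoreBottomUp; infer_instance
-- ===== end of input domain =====

-- B replaces A's bottom-up 2-D DP table with a top-down dict-memoized recursion (alternative decomposition, same cost).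


-- ===== PORT A =====
-- dp[i][j] read / write helpers (every access A performs inside Pre_ has 0 ≤ index < length)
def dpGet (dp : List (List Int)) (i j : Int) : Int :=
  (dp.getD i.toNat []).getD j.toNat 0

def dpSet (dp : List (List Int)) (i j : Int) (v : Int) : List (List Int) :=
  dp.set i.toNat ((dp.getD i.toNat []).set j.toNat v)

def maximumScoreBottomUp (nums : List Int) (multipliers : List Int) : Int :=
  let dp0 : List (List Int) :=
    (PySem.List.pyRange 0 ((multipliers.length : Int) + 1) 1).foldl
      (fun dp _ => dp ++ [List.replicate (nums.length + 1) 0]) []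
  let dp :=
    (PySem.List.pyRange ((multipliers.length : Int) - 1) (-1) (-1)).foldl
      (fun dp m =>
        let multi := PySem.List.pyGetD multipliers m 0
        (PySem.List.pyRange m (-1) (-1)).foldl
          (fun dp left =>
            let right : Int := (nums.length : Int) - 1 - (m - left)
            let option1 := multi * PySem.List.pyGetD nums left 0
            let option2 := multi * PySem.List.pyGetD nums right 0
            dpSet dp m left
              (max (option1 + dpGet dp (m + 1) (left + 1))
                   (option2 + dpGet dp (m + 1) left))) dp) dp0
  dpGet dp 0 0

-- ===== PORT B =====
-- f(op, left) with the dict memo threaded through; the fuel argument only makes the recursion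
-- structural (fuel = len(multipliers)+1 at the top level is never exhausted).
def altF (nums : List Int) (multipliers : List Int) :
    Nat → Int → Int → PySem.Dict (Int × Int) Int → Int × PySem.Dict (Int × Int) Int
  | 0, _, _, memo => (0, memo)
  | fuel + 1, op, left, memo =>
    if op = (multipliers.length : Int) then (0, memo)
    else
      match memo.get? (op, left) with
      | some v => (v, memo)
      | none =>
        let multi := PySem.List.pyGetD multipliers op 0
        let right : Int := (nums.length : Int) - 1 - (op - left)
        let res1 := altF nums multipliers fuel (op + 1) (left + 1) memo
        let res2 := altF nums multipliers fuel (op + 1) left res1.2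
        let best := max (multi * PySem.List.pyGetD nums left 0 + res1.1)
                        (multi * PySem.List.pyGetD nums right 0 + res2.1)
        (best, res2.2.insert (op, left) best)

def maximumScoreBottomUp_alt (nums : List Int) (multipliers : List Int) : Int :=
  (altF nums multipliers (multipliers.length + 1) 0 0 PySem.Dict.empty).1

-- ===== PRECONDITION & SPEC =====
-- Pre_ excludes exactly the inputs where A raises IndexError (when len(multipliers) > len(nums),
-- A reads nums[left] at left = len(multipliers)-1, out of range); B raises IndexError there too.
def Pre_maximumScoreBottomUp (nums : List Int) (multipliers : List Int) : Prop :=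
  multipliers.length ≤ nums.length
instance (nums : List Int) (multipliers : List Int) : Decidable (Pre_maximumScoreBottomUp nums multipliers) := by unfold Pre_maximumScoreBottomUp; infer_instance

def pvWitness_maximumScoreBottomUp : List Int × List Int := ([1, 2, 3], [3, 2, 1])

def Spec_maximumScoreBottomUp (nums : List Int) (multipliers : List Int) (out : Int) : Prop := out = maximumScoreBottomUp_alt nums multipliers
instance (nums : List Int) (multipliers : List Int) (out : Int) : Decidable (Spec_maximumScoreBottomUp nums multipliers out) := by unfold Spec_maximumScoreBottomUp; infer_instance

-- ===== CLAIM (what is proved, stated in full; the proofs are below) =====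
def Claim_equal_maximumScoreBottomUp : Prop := ∀ (nums : List Int) (multipliers : List Int), Dom_maximumScoreBottomUp nums multipliers → Pre_maximumScoreBottomUp nums multipliers → Spec_maximumScoreBottomUp nums multipliers (maximumScoreBottomUp nums multipliers)

-- ===== LEMMAS AND PROOFS =====

-- The mathematical recurrence both programs compute.
def gI (nums : List Int) (multipliers : List Int) (op left : Int) : Int :=
  if _h : 0 ≤ op ∧ op < (multipliers.length : Int) then
    max (PySem.List.pyGetD multipliers op 0 * PySem.List.pyGetD nums left 0 +
          gI nums multipliers (op + 1) (left + 1))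
        (PySem.List.pyGetD multipliers op 0 *
          PySem.List.pyGetD nums ((nums.length : Int) - 1 - (op - left)) 0 +
          gI nums multipliers (op + 1) left)
  else 0
termination_by multipliers.length - op.toNat
decreasing_by all_goals omega

lemma gI_base (nums multipliers : List Int) (op left : Int)
    (h : ¬ (0 ≤ op ∧ op < (multipliers.length : Int))) :
    gI nums multipliers op left = 0 := by
  rw [gI]; exact dif_neg h

lemma gI_step (nums multipliers : List Int) (op left : Int)
    (h1 : 0 ≤ op) (h2 : op < (multipliers.length : Int)) :
    gI nums multipliers op left =
      max (PySem.List.pyGetD multipliers op 0 * PySem.List.pyGetD nums left 0 +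
            gI nums multipliers (op + 1) (left + 1))
          (PySem.List.pyGetD multipliers op 0 *
            PySem.List.pyGetD nums ((nums.length : Int) - 1 - (op - left)) 0 +
            gI nums multipliers (op + 1) left) := by
  rw [gI]; exact dif_pos ⟨h1, h2⟩

-- ---------- B side ----------

def MemoOK (nums multipliers : List Int) (memo : PySem.Dict (Int × Int) Int) : Prop :=
  ∀ p v, memo.get? p = some v → v = gI nums multipliers p.1 p.2

lemma altF_correct (nums multipliers : List Int) :
    ∀ (fuel : Nat) (op left : Int) (memo : PySem.Dict (Int × Int) Int),
      0 ≤ op → op ≤ (multipliers.length : Int) →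
      op.toNat + fuel ≥ multipliers.length → MemoOK nums multipliers memo →
      (altF nums multipliers fuel op left memo).1 = gI nums multipliers op left ∧
      MemoOK nums multipliers (altF nums multipliers fuel op left memo).2 := by
  intro fuel
  induction fuel with
  | zero =>
    intro op left memo hop hle hfuel hmemo
    have h0 : gI nums multipliers op left = 0 :=
      gI_base nums multipliers op left (by omega)
    exact ⟨h0.symm, hmemo⟩
  | succ fuel ih =>
    intro op left memo hop hle hfuel hmemo
    by_cases hk : op = (multipliers.length : Int)
    · have h0 : gI nums multipliers op left = 0 :=
        gI_base nums multipliers op left (by omega)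
      rw [altF, if_pos hk]
      exact ⟨h0.symm, hmemo⟩
    · have hlt : op < (multipliers.length : Int) := by omega
      rw [altF, if_neg hk]
      cases hget : memo.get? (op, left) with
      | some v => exact ⟨hmemo _ _ hget, hmemo⟩
      | none =>
        obtain ⟨h1v, h1m⟩ := ih (op + 1) (left + 1) memo (by omega) (by omega) (by omega) hmemo
        obtain ⟨h2v, h2m⟩ := ih (op + 1) left
          (altF nums multipliers fuel (op + 1) (left + 1) memo).2
          (by omega) (by omega) (by omega) h1m
        have hbest :
            max (PySem.List.pyGetD multipliers op 0 * PySem.List.pyGetD nums left 0 +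
                  (altF nums multipliers fuel (op + 1) (left + 1) memo).1)
                (PySem.List.pyGetD multipliers op 0 *
                  PySem.List.pyGetD nums ((nums.length : Int) - 1 - (op - left)) 0 +
                  (altF nums multipliers fuel (op + 1) left
                    (altF nums multipliers fuel (op + 1) (left + 1) memo).2).1)
              = gI nums multipliers op left := by
          rw [h1v, h2v]
          exact (gI_step nums multipliers op left hop hlt).symm
        refine ⟨hbest, ?_⟩
        intro p v hpv
        rw [PySem.Dict.get?_insert] at hpv
        by_cases hp : p = (op, left)
        · rw [if_pos hp] at hpv
          have hv := Option.some.inj hpv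
          rw [← hv, hp]
          exact hbest
        · rw [if_neg hp] at hpv
          exact h2m _ _ hpv

-- ---------- A side ----------

def Shape (nums multipliers : List Int) (dp : List (List Int)) : Prop :=
  dp.length = multipliers.length + 1 ∧ ∀ row ∈ dp, row.length = nums.length + 1

-- rows m' > m of dp hold the recurrence values at columns 0..m'
def RowsOK (nums multipliers : List Int) (m : Int) (dp : List (List Int)) : Prop :=
  ∀ (m' left : Int), m < m' → m' ≤ (multipliers.length : Int) → 0 ≤ left → left ≤ m' →
    dpGet dp m' left = gI nums multipliers m' left

-- the body of A's inner loop, named for the lemmas (definitionally equal to the port's lambda)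
def innerStep (nums multipliers : List Int) (m : Int) (dp : List (List Int)) (left : Int) :
    List (List Int) :=
  dpSet dp m left
    (max (PySem.List.pyGetD multipliers m 0 * PySem.List.pyGetD nums left 0 +
            dpGet dp (m + 1) (left + 1))
         (PySem.List.pyGetD multipliers m 0 *
            PySem.List.pyGetD nums ((nums.length : Int) - 1 - (m - left)) 0 +
            dpGet dp (m + 1) left))

lemma shape_row_len (nums multipliers : List Int) (dp : List (List Int))
    (h : Shape nums multipliers dp) (i : Nat) (hi : i < dp.length) :
    (dp.getD i []).length = nums.length + 1 := by
  have hrow : dp.getD i [] = dp[i] := by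
    rw [List.getD_eq_getElem?_getD, List.getElem?_eq_getElem hi]
    rfl
  rw [hrow]
  exact h.2 _ (List.getElem_mem hi)

lemma dpSet_shape (nums multipliers : List Int) (dp : List (List Int)) (i j v : Int)
    (h : Shape nums multipliers dp) (hi : i.toNat < dp.length) :
    Shape nums multipliers (dpSet dp i j v) := by
  constructor
  · rw [dpSet, List.length_set]; exact h.1
  · intro row hrow
    rcases List.mem_or_eq_of_mem_set hrow with hmem | heq
    · exact h.2 _ hmem
    · rw [heq, List.length_set]
      exact shape_row_len nums multipliers dp h i.toNat hi

lemma dpGet_dpSet (dp : List (List Int)) (i j i' j' v : Int)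
    (hir : i.toNat < dp.length) (hjr : j.toNat < (dp.getD i.toNat []).length) :
    dpGet (dpSet dp i j v) i' j' =
      if i'.toNat = i.toNat ∧ j'.toNat = j.toNat then v else dpGet dp i' j' := by
  simp only [List.getD_eq_getElem?_getD] at hjr
  unfold dpGet dpSet
  simp only [List.getD_eq_getElem?_getD]
  by_cases hi : i'.toNat = i.toNat
  · rw [hi, List.getElem?_set_self hir]
    by_cases hj : j'.toNat = j.toNat
    · rw [if_pos ⟨rfl, hj⟩, hj]
      simp only [Option.getD_some]
      rw [List.getElem?_set_self hjr]
      rfl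
    · rw [if_neg (by tauto)]
      simp only [Option.getD_some]
      rw [List.getElem?_set_ne (Ne.symm hj)]
  · rw [if_neg (by tauto), List.getElem?_set_ne (Ne.symm hi)]

-- inner loop: fills dp[m][left] for left = j, j-1, ..., 0, keeping rows above m intact
lemma inner_correct (nums multipliers : List Int)
    (hkn : multipliers.length ≤ nums.length) (m : Int)
    (hm0 : 0 ≤ m) (hmk : m < (multipliers.length : Int)) :
    ∀ (t : Nat) (j : Int), (j + 1).toNat ≤ t → j ≤ m →
      ∀ dp, Shape nums multipliers dp → RowsOK nums multipliers m dp →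
      (∀ left, j < left → 0 ≤ left → left ≤ m →
        dpGet dp m left = gI nums multipliers m left) →
      (Shape nums multipliers
        ((PySem.List.pyRange j (-1) (-1)).foldl (innerStep nums multipliers m) dp) ∧
       RowsOK nums multipliers m
        ((PySem.List.pyRange j (-1) (-1)).foldl (innerStep nums multipliers m) dp) ∧
       (∀ left, 0 ≤ left → left ≤ m →
          dpGet ((PySem.List.pyRange j (-1) (-1)).foldl (innerStep nums multipliers m) dp)
            m left = gI nums multipliers m left)) := by
  intro t
  induction t with
  | zero =>
    intro j ht hjm dp hshape hrows hfill
    have hneg : j ≤ -1 := by omega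
    rw [PySem.List.pyRange_neg_one_eq_nil (by omega)]
    exact ⟨hshape, hrows, fun left h0 hm => hfill left (by omega) h0 hm⟩
  | succ t ih =>
    intro j ht hjm dp hshape hrows hfill
    by_cases hj0 : j < 0
    · rw [PySem.List.pyRange_neg_one_eq_nil (by omega)]
      exact ⟨hshape, hrows, fun left h0 hm => hfill left (by omega) h0 hm⟩
    · rw [PySem.List.pyRange_neg_one_cons (by omega), List.foldl_cons]
      have hir : m.toNat < dp.length := by
        rw [hshape.1]; omega
      have hjr : j.toNat < (dp.getD m.toNat []).length := by
        rw [shape_row_len nums multipliers dp hshape m.toNat hir]; omega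
      have hread1 : dpGet dp (m + 1) (j + 1) = gI nums multipliers (m + 1) (j + 1) :=
        hrows (m + 1) (j + 1) (by omega) (by omega) (by omega) (by omega)
      have hread2 : dpGet dp (m + 1) j = gI nums multipliers (m + 1) j :=
        hrows (m + 1) j (by omega) (by omega) (by omega) (by omega)
      have hdp1 : innerStep nums multipliers m dp j = dpSet dp m j (gI nums multipliers m j) := by
        unfold innerStep
        rw [hread1, hread2]
        exact congrArg (dpSet dp m j) (gI_step nums multipliers m j hm0 hmk).symm
      rw [hdp1]
      apply ih (j - 1) (by omega) (by omega)
      · exact dpSet_shape nums multipliers dp m j _ hshape hir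
      · intro m' left hm' hm'k h0 hlm
        rw [dpGet_dpSet dp m j m' left _ hir hjr, if_neg (by omega)]
        exact hrows m' left hm' hm'k h0 hlm
      · intro left hjl h0 hlm
        rw [dpGet_dpSet dp m j m left _ hir hjr]
        by_cases hlj : left = j
        · rw [if_pos ⟨rfl, by omega⟩, hlj]
        · rw [if_neg (by omega)]
          exact hfill left (by omega) h0 hlm

-- outer loop: processes m = mj, mj-1, ..., 0
lemma outer_correct (nums multipliers : List Int)
    (hkn : multipliers.length ≤ nums.length) :
    ∀ (t : Nat) (mj : Int), (mj + 1).toNat ≤ t → mj ≤ (multipliers.length : Int) - 1 →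
      ∀ dp, Shape nums multipliers dp → RowsOK nums multipliers mj dp →
      RowsOK nums multipliers (-1)
        ((PySem.List.pyRange mj (-1) (-1)).foldl
          (fun dp m => (PySem.List.pyRange m (-1) (-1)).foldl (innerStep nums multipliers m) dp)
          dp) := by
  intro t
  induction t with
  | zero =>
    intro mj ht hmj dp hshape hrows
    rw [PySem.List.pyRange_neg_one_eq_nil (by omega)]
    intro m' left hm' hm'k h0 hlm
    exact hrows m' left (by omega) hm'k h0 hlm
  | succ t ih =>
    intro mj ht hmj dp hshape hrows
    by_cases hj0 : mj < 0
    · rw [PySem.List.pyRange_neg_one_eq_nil (by omega)]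
      intro m' left hm' hm'k h0 hlm
      exact hrows m' left (by omega) hm'k h0 hlm
    · rw [PySem.List.pyRange_neg_one_cons (by omega), List.foldl_cons]
      obtain ⟨hshape1, hrows1, hfill1⟩ :=
        inner_correct nums multipliers hkn mj (by omega) (by omega)
          (mj + 1).toNat mj (by omega) (le_refl mj) dp hshape hrows
          (fun left hl h0 hm => absurd (lt_of_lt_of_le hl hm) (lt_irrefl mj))
      apply ih (mj - 1) (by omega) (by omega) _ hshape1
      intro m' left hm' hm'k h0 hlm
      by_cases hme : m' = mj
      · rw [hme]
        exact hfill1 left h0 (hme ▸ hlm)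
      · exact hrows1 m' left (by omega) hm'k h0 hlm

lemma dp0_eq (nums multipliers : List Int) :
    (PySem.List.pyRange 0 ((multipliers.length : Int) + 1) 1).foldl
      (fun dp _ => dp ++ [List.replicate (nums.length + 1) (0 : Int)]) ([] : List (List Int)) =
    List.replicate (multipliers.length + 1) (List.replicate (nums.length + 1) (0 : Int)) := by
  have gen : ∀ (l : List Int) (acc : List (List Int)),
      l.foldl (fun dp _ => dp ++ [List.replicate (nums.length + 1) (0 : Int)]) acc =
      acc ++ List.replicate l.length (List.replicate (nums.length + 1) (0 : Int)) := by
    intro l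
    induction l with
    | nil => simp
    | cons x xs ih =>
      intro acc
      rw [List.foldl_cons, ih]
      simp [List.replicate_succ]
  refine (gen _ _).trans ?_
  simp [PySem.List.length_pyRange_one]

lemma dp0_shape (nums multipliers : List Int) :
    Shape nums multipliers
      (List.replicate (multipliers.length + 1) (List.replicate (nums.length + 1) 0)) := by
  constructor
  · rw [List.length_replicate]
  · intro row hrow
    rw [List.eq_of_mem_replicate hrow, List.length_replicate]

lemma dp0_rows (nums multipliers : List Int) :
    RowsOK nums multipliers ((multipliers.length : Int) - 1)
      (List.replicate (multipliers.length + 1) (List.replicate (nums.length + 1) 0)) := by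
  intro m' left hm' hm'k h0 hlm
  have hm'eq : m' = (multipliers.length : Int) := by omega
  rw [gI_base nums multipliers m' left (by omega)]
  unfold dpGet
  simp only [List.getD_eq_getElem?_getD, List.getElem?_replicate]
  split_ifs <;> simp

-- ===== VERDICT (by name: the statement is the Claim_ definition above) =====
theorem maximumScoreBottomUp_spec : Claim_equal_maximumScoreBottomUp := by
  intro nums multipliers _hdom hpre
  unfold Spec_maximumScoreBottomUp
  have hB : maximumScoreBottomUp_alt nums multipliers = gI nums multipliers 0 0 := by
    unfold maximumScoreBottomUp_alt
    exact (altF_correct nums multipliers (multipliers.length + 1) 0 0 PySem.Dict.empty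
      (by omega) (by omega) (by omega)
      (fun p v h => by rw [PySem.Dict.get?_empty] at h; cases h)).1
  have hA : maximumScoreBottomUp nums multipliers = gI nums multipliers 0 0 := by
    show dpGet
      ((PySem.List.pyRange ((multipliers.length : Int) - 1) (-1) (-1)).foldl
        (fun dp m => (PySem.List.pyRange m (-1) (-1)).foldl (innerStep nums multipliers m) dp)
        ((PySem.List.pyRange 0 ((multipliers.length : Int) + 1) 1).foldl
          (fun dp _ => dp ++ [List.replicate (nums.length + 1) 0]) [])) 0 0
      = gI nums multipliers 0 0
    rw [dp0_eq]
    have hrows := outer_correct nums multipliers hpre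
      ((multipliers.length : Int) - 1 + 1).toNat ((multipliers.length : Int) - 1)
      (le_refl _) (by omega) _ (dp0_shape nums multipliers) (dp0_rows nums multipliers)
    exact hrows 0 0 (by omega) (by omega) (by omega) (by omega)
  rw [hA, hB]
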